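-- pv_equiv track=rewrite | github.com/981377660LMT/algorithm-study | 11_动态规划/子数组/3524. 求出数组的 X 值 I-子数组乘积取模.py | resultArray
-- ===== SOURCE A (Python) =====
-- from typing import List
--
-- def resultArray(nums: List[int], k: int) -> List[int]:
--     res = [0] * k
--     dp = [0] * k
--     for v in nums:
--         ndp = [0] * k
--         ndp[v % k] = 1  # 单独
--         for m, c in enumerate(dp):  # 之前的
--             ndp[m * v % k] += c
--         dp = ndp
--         for m, c in enumerate(dp):
--             res[m] += c
--     return res
-- ===== SOURCE B (Python) =====
-- from typing import List
--
-- def resultArray(nums: List[int], k: int) -> List[int]: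
--     residues = []  # product-mod-k of every subarray, enumerated by start index
--     n = len(nums)
--     for i in range(n):
--         p = 1
--         for j in range(i, n):
--             p = p * nums[j] % k
--             residues.append(p)
--     res = [0] * k
--     for r in residues:
--         res[r] += 1
--     return res
-- ===== Notes on version B (the rewrite author's own statement) =====
-- stated objective: alternative
-- what changed: Enumerates subarrays by start index with a running product, collecting every subarray's residue into one flat list, and builds the answer only at the end by one histogram pass over that list, instead of A's per-element remapping of a k-slot count histogram with incremental tallying.
import Mathlib
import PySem

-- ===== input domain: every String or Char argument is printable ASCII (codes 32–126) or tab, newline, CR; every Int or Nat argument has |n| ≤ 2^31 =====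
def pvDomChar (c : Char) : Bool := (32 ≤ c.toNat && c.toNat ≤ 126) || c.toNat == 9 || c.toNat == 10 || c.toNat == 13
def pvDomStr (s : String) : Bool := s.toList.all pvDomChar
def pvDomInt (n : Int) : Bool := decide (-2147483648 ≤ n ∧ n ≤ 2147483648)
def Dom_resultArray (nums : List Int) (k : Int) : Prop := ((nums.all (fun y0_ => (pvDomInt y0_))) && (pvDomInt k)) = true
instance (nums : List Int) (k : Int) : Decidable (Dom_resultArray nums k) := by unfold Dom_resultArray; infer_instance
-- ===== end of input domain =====

-- B enumerates subarrays by start index with a running product, collecting every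
-- subarray's residue into one flat list and counting each residue value at the end,
-- instead of A's per-element remapping of a k-slot count histogram.

-- ===== PORT A =====
-- loop body of A's 'for v in nums' (ndp built from a unit vector plus the remapped dp counts, then added into res)
def stepA (k : Int) (st : List Int × List Int) (v : Int) : List Int × List Int :=
  let ndp0 := PySem.List.pySetD (List.replicate k.toNat 0) (PySem.Int.mod v k) 1
  let ndp := (PySem.List.enumerate st.2 0).foldl
      (fun nd mc => PySem.List.pySetD nd (PySem.Int.mod (mc.1 * v) k)
        (PySem.List.pyGetD nd (PySem.Int.mod (mc.1 * v) k) 0 + mc.2)) ndp0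
  let res := (PySem.List.enumerate ndp 0).foldl
      (fun r mc => PySem.List.pySetD r mc.1 (PySem.List.pyGetD r mc.1 0 + mc.2)) st.1
  (res, ndp)

def resultArray (nums : List Int) (k : Int) : List Int :=
  (nums.foldl (stepA k) (List.replicate k.toNat 0, List.replicate k.toNat 0)).1

-- ===== PORT B =====
-- outer loop over start index i, inner loop over end index j with running product p
-- appended to 'residues'; result built at the end by one histogram pass 'res[r] += 1'
def resultArray_alt (nums : List Int) (k : Int) : List Int :=
  let residues := (PySem.List.pyRange 0 (nums.length : Int) 1).foldl
    (fun acc i =>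
      ((PySem.List.pyRange i (nums.length : Int) 1).foldl
        (fun (st : List Int × Int) j =>
          let p := PySem.Int.mod (st.2 * PySem.List.pyGetD nums j 0) k
          (st.1 ++ [p], p))
        (acc, 1)).1)
    []
  residues.foldl
    (fun res r => PySem.List.pySetD res r (PySem.List.pyGetD res r 0 + 1))
    (List.replicate k.toNat 0)

-- ===== PRECONDITION & SPEC =====
-- Pre_ excludes exactly the inputs on which A raises: k ≤ 0 with nums nonempty
-- (ZeroDivisionError for k = 0, IndexError for k < 0).
def Pre_resultArray (nums : List Int) (k : Int) : Prop := 1 ≤ k ∨ nums = []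
instance (nums : List Int) (k : Int) : Decidable (Pre_resultArray nums k) := by
  unfold Pre_resultArray; infer_instance

def pvWitness_resultArray : List Int × Int := ([1, 2, 3, 4], 3)

def Spec_resultArray (nums : List Int) (k : Int) (out : List Int) : Prop := out = resultArray_alt nums k
instance (nums : List Int) (k : Int) (out : List Int) : Decidable (Spec_resultArray nums k out) := by
  unfold Spec_resultArray; infer_instance

-- ===== CLAIM (what is proved, stated in full; the proofs are below) =====
def Claim_equal_resultArray : Prop := ∀ (nums : List Int) (k : Int), Dom_resultArray nums k → Pre_resultArray nums k → Spec_resultArray nums k (resultArray nums k)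

-- ===== LEMMAS AND PROOFS =====

-- proof intermediate: the loop of A reformulated over the explicit list of residues
-- of all subarrays ending at the current index ('ends'); A's dp is its histogram
def stepMid (k : Int) (st : List Int × List Int) (v : Int) : List Int × List Int :=
  let ends := st.2.map (fun r => PySem.Int.mod (r * v) k) ++ [PySem.Int.mod v k]
  let res := ends.foldl
      (fun r e => PySem.List.pySetD r e (PySem.List.pyGetD r e 0 + 1)) st.1
  (res, ends)

-- Nat-indexed bump 'h[i] += c' and the histogram of a residue list
def bumpN (h : List Int) (i : Nat) (c : Int) : List Int := h.set i (h.getD i 0 + c)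
def histN (K : Nat) (l : List Int) : List Int :=
  l.foldl (fun h r => bumpN h r.toNat 1) (List.replicate K 0)

theorem length_bumpN (h : List Int) (i : Nat) (c : Int) : (bumpN h i c).length = h.length := by
  simp [bumpN]

theorem getD_bumpN (h : List Int) (i : Nat) (c : Int) (j : Nat) (hi : i < h.length) :
    (bumpN h i c).getD j 0 = h.getD j 0 + if i = j then c else 0 := by
  unfold bumpN
  by_cases hij : i = j
  · subst hij
    simp [List.getD_eq_getElem?_getD, List.getElem?_set_self, hi]
  · rw [List.getD_eq_getElem?_getD, List.getElem?_set_ne hij, if_neg hij,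
        List.getD_eq_getElem?_getD, add_zero]

theorem length_foldl_bumpN {α : Type} (ps : List α) (idx : α → Nat) (amt : α → Int)
    (base : List Int) :
    (ps.foldl (fun h p => bumpN h (idx p) (amt p)) base).length = base.length := by
  induction ps generalizing base with
  | nil => rfl
  | cons p t ih => simp [List.foldl_cons, ih, length_bumpN]

theorem getD_foldl_bumpN {α : Type} (ps : List α) (idx : α → Nat) (amt : α → Int)
    (base : List Int) (j : Nat) (hidx : ∀ p ∈ ps, idx p < base.length) :
    (ps.foldl (fun h p => bumpN h (idx p) (amt p)) base).getD j 0
      = base.getD j 0 + ((ps.filter (fun p => idx p == j)).map amt).sum := by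
  induction ps generalizing base with
  | nil => simp
  | cons p t ih =>
    have hp : idx p < base.length := hidx p (List.mem_cons_self)
    rw [List.foldl_cons, ih _ (by intro q hq; rw [length_bumpN]; exact hidx q (List.mem_cons_of_mem _ hq)),
        getD_bumpN _ _ _ _ hp]
    by_cases h : idx p = j <;> simp [h] <;> ring

theorem length_histN (K : Nat) (l : List Int) : (histN K l).length = K := by
  unfold histN; rw [length_foldl_bumpN]; simp

theorem getD_histN (K : Nat) (l : List Int) (j : Nat)
    (hl : ∀ r ∈ l, r.toNat < K) :
    (histN K l).getD j 0 = (l.countP (fun r => r.toNat == j) : Int) := by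
  unfold histN
  rw [getD_foldl_bumpN _ _ _ _ _ (by simpa using hl)]
  simp [List.countP_eq_length_filter]

-- the filtered-enumerate sum is a Finset.range sum over the list's entries
theorem enum_filter_sum (dp : List Int) (s : Int) (Q : Int → Bool) :
    ((((PySem.List.enumerate dp s).filter (fun p => Q p.1)).map (fun p => p.2)).sum)
      = ∑ m ∈ Finset.range dp.length, (if Q (s + m) then dp.getD m 0 else 0) := by
  induction dp generalizing s with
  | nil => simp [PySem.List.enumerate_nil]
  | cons d t ih =>
    rw [PySem.List.enumerate_cons, List.filter_cons, List.length_cons,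
        Finset.sum_range_succ']
    have hshift : ∀ m : Nat, (if Q (s + (m + 1 : Nat)) then (d :: t).getD (m + 1) 0 else 0)
        = (if Q ((s + 1) + m) then t.getD m 0 else 0) := by
      intro m; congr 1; · congr 1; push_cast; ring
    simp only [hshift]
    rw [← ih (s + 1)]
    by_cases h : Q s <;> simp [h] <;> ring

-- summing a per-residue count over all residues counts the list once
theorem count_sum (K : Nat) (Q : Nat → Bool) (l : List Int)
    (hl : ∀ r ∈ l, 0 ≤ r ∧ r.toNat < K) :
    (∑ m ∈ Finset.range K, (if Q m then (l.countP (fun r => r.toNat == m) : Int) else 0))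
      = (l.countP (fun r => Q r.toNat) : Int) := by
  induction l with
  | nil => simp
  | cons r t ih =>
    have hr := hl r (List.mem_cons_self)
    have ht : ∀ x ∈ t, 0 ≤ x ∧ x.toNat < K := fun x hx => hl x (List.mem_cons_of_mem _ hx)
    have hcnt : ∀ m : Nat, ((r :: t).countP (fun x => x.toNat == m) : Int)
        = (t.countP (fun x => x.toNat == m) : Int) + (if r.toNat = m then 1 else 0) := by
      intro m; rw [List.countP_cons]; by_cases h : r.toNat = m <;> simp [h]
    have hsplit : ∀ m ∈ Finset.range K,
        (if Q m then ((r :: t).countP (fun x => x.toNat == m) : Int) else 0)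
          = (if Q m then (t.countP (fun x => x.toNat == m) : Int) else 0)
            + (if m = r.toNat then (if Q m then 1 else 0) else 0) := by
      intro m _
      rw [hcnt m]
      by_cases h : Q m
      · rw [if_pos h, if_pos h]
        by_cases h2 : m = r.toNat
        · rw [if_pos h2, if_pos h2.symm, if_pos h]
        · rw [if_neg h2, if_neg (fun hh => h2 hh.symm), add_zero]
      · rw [if_neg (by simp [h]), if_neg (by simp [h]), zero_add]
        by_cases h2 : m = r.toNat
        · rw [if_pos h2, if_neg (by simp [h])]
        · rw [if_neg h2]
    rw [Finset.sum_congr rfl hsplit, Finset.sum_add_distrib, ih ht,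
        Finset.sum_ite_eq' (Finset.range K) r.toNat (fun m => if Q m then (1 : Int) else 0)]
    have hmem : r.toNat ∈ Finset.range K := Finset.mem_range.2 hr.2
    rw [List.countP_cons, if_pos hmem]
    by_cases h : Q r.toNat
    · simp only [h, if_true]
      push_cast; ring
    · simp only [h, Bool.false_eq_true, if_false]
      push_cast; ring

-- extensionality for Int lists via getD
theorem eq_of_getD (a b : List Int) (hl : a.length = b.length)
    (h : ∀ j : Nat, a.getD j 0 = b.getD j 0) : a = b := by
  apply List.ext_getElem hl
  intro j h1 h2
  have := h j
  rwa [List.getD_eq_getElem a 0 h1, List.getD_eq_getElem b 0 h2] at this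

theorem pyGetD_nonneg (xs : List Int) (i : Int) (d : Int) (h : 0 ≤ i) :
    PySem.List.pyGetD xs i d = xs.getD i.toNat d := by
  simp [PySem.List.pyGetD, PySem.List.pyGet?_of_nonneg xs h, List.getD]

theorem toNat_mod_lt (x k : Int) (hk : 0 < k) : (PySem.Int.mod x k).toNat < k.toNat := by
  have h1 := PySem.Int.mod_nonneg x hk
  have h2 := PySem.Int.mod_lt x hk
  omega

-- A's inner remapping loop over the histogram of `ends` builds the histogram of the new ends list
theorem A_ndp_eq (k v : Int) (hk : 0 < k) (ends : List Int)
    (hends : ∀ r ∈ ends, 0 ≤ r ∧ r < k) :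
    (PySem.List.enumerate (histN k.toNat ends) 0).foldl
      (fun nd mc => PySem.List.pySetD nd (PySem.Int.mod (mc.1 * v) k)
        (PySem.List.pyGetD nd (PySem.Int.mod (mc.1 * v) k) 0 + mc.2))
      (PySem.List.pySetD (List.replicate k.toNat 0) (PySem.Int.mod v k) 1)
    = histN k.toNat (ends.map (fun r => PySem.Int.mod (r * v) k) ++ [PySem.Int.mod v k]) := by
  have hKends : ∀ r ∈ ends, r.toNat < k.toNat := by
    intro r hr; have := hends r hr; omega
  have hbase : PySem.List.pySetD (List.replicate k.toNat 0) (PySem.Int.mod v k) 1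
      = bumpN (List.replicate k.toNat 0) (PySem.Int.mod v k).toNat 1 := by
    rw [PySem.List.pySetD_of_nonneg _ _ (PySem.Int.mod_nonneg v hk)]
    unfold bumpN
    simp
  have hstep : ∀ (acc : List Int), ∀ mc ∈ PySem.List.enumerate (histN k.toNat ends) 0,
      PySem.List.pySetD acc (PySem.Int.mod (mc.1 * v) k)
        (PySem.List.pyGetD acc (PySem.Int.mod (mc.1 * v) k) 0 + mc.2)
      = bumpN acc (PySem.Int.mod (mc.1 * v) k).toNat mc.2 := by
    intro acc mc _
    rw [PySem.List.pySetD_of_nonneg _ _ (PySem.Int.mod_nonneg _ hk),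
        pyGetD_nonneg _ _ _ (PySem.Int.mod_nonneg _ hk)]
    rfl
  rw [hbase, PySem.List.foldl_congr_mem _ _
      (fun nd mc => bumpN nd (PySem.Int.mod (mc.1 * v) k).toNat mc.2) _ hstep]
  apply eq_of_getD
  · rw [length_foldl_bumpN (idx := fun mc : Int × Int => (PySem.Int.mod (mc.1 * v) k).toNat)
        (amt := fun mc : Int × Int => mc.2), length_bumpN, List.length_replicate, length_histN]
  intro j
  rw [getD_foldl_bumpN (idx := fun mc : Int × Int => (PySem.Int.mod (mc.1 * v) k).toNat)
        (amt := fun mc : Int × Int => mc.2) _ _ j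
        (by intro p _
            rw [length_bumpN, List.length_replicate]
            exact toNat_mod_lt _ _ hk),
      getD_bumpN _ _ _ _ (by rw [List.length_replicate]; exact toNat_mod_lt _ _ hk)]
  rw [enum_filter_sum (histN k.toNat ends) 0 (fun m => (PySem.Int.mod (m * v) k).toNat == j),
      length_histN]
  have hsum : ∀ m ∈ Finset.range k.toNat,
      (if ((PySem.Int.mod (((0:Int) + (m:Nat)) * v) k).toNat == j : Bool)
        then (histN k.toNat ends).getD m 0 else 0)
      = (if ((fun m : Nat => (PySem.Int.mod ((m : Int) * v) k).toNat == j) m : Bool)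
        then (ends.countP (fun r => r.toNat == m) : Int) else 0) := by
    intro m _
    rw [zero_add, getD_histN k.toNat ends m hKends]
  rw [Finset.sum_congr rfl hsum,
      count_sum k.toNat _ ends (by intro r hr; exact ⟨(hends r hr).1, hKends r hr⟩)]
  have hcpA : ends.countP
        (fun r => ((fun m : Nat => (PySem.Int.mod ((m:Int) * v) k).toNat == j) r.toNat : Bool))
      = ends.countP (fun r => (PySem.Int.mod (r * v) k).toNat == j) := by
    apply List.countP_congr
    intro r hr
    have h0 : ((r.toNat : Int)) = r := Int.toNat_of_nonneg (hends r hr).1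
    simp only [h0]
  rw [hcpA]
  have hR : (histN k.toNat (ends.map (fun r => PySem.Int.mod (r * v) k)
        ++ [PySem.Int.mod v k])).getD j 0
      = ((ends.map (fun r => PySem.Int.mod (r * v) k) ++ [PySem.Int.mod v k]).countP
          (fun r => r.toNat == j) : Int) := by
    apply getD_histN
    intro r hr
    rcases List.mem_append.1 hr with h | h
    · obtain ⟨x, _, rfl⟩ := List.mem_map.1 h
      exact toNat_mod_lt _ _ hk
    · rw [List.mem_singleton.1 h]
      exact toNat_mod_lt _ _ hk
  rw [hR, List.countP_append, List.countP_map]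
  have hco : (ends.countP ((fun r => r.toNat == j) ∘ (fun r => PySem.Int.mod (r * v) k)))
      = ends.countP (fun r => (PySem.Int.mod (r * v) k).toNat == j) := rfl
  rw [hco]
  by_cases h : (PySem.Int.mod v k).toNat = j
  · rw [if_pos h]
    simp [h]
    ring
  · rw [if_neg h]
    simp [h]

theorem length_foldl_pySetD {α : Type} (l : List α) (idx : α → Int)
    (val : List Int → α → Int) (res : List Int) :
    (l.foldl (fun r e => PySem.List.pySetD r (idx e) (val r e)) res).length = res.length := by
  induction l generalizing res with
  | nil => rfl
  | cons e t ih => rw [List.foldl_cons, ih, PySem.List.length_pySetD]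

-- A's res-accumulation over the histogram equals the per-subarray tally over the residue list
theorem res_upd_eq (k : Int) (hk : 0 < k) (res l : List Int) (hres : res.length = k.toNat)
    (hl : ∀ r ∈ l, 0 ≤ r ∧ r < k) :
    (PySem.List.enumerate (histN k.toNat l) 0).foldl
      (fun r mc => PySem.List.pySetD r mc.1 (PySem.List.pyGetD r mc.1 0 + mc.2)) res
    = l.foldl (fun r e => PySem.List.pySetD r e (PySem.List.pyGetD r e 0 + 1)) res := by
  have hKl : ∀ r ∈ l, r.toNat < k.toNat := by intro r hr; have := hl r hr; omega
  have hstepA : ∀ (acc : List Int), ∀ mc ∈ PySem.List.enumerate (histN k.toNat l) 0,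
      PySem.List.pySetD acc mc.1 (PySem.List.pyGetD acc mc.1 0 + mc.2)
      = bumpN acc mc.1.toNat mc.2 := by
    intro acc mc hmc
    obtain ⟨m, hm, rfl⟩ := (PySem.List.mem_enumerate_iff _ _ _).1 hmc
    have h0 : (0:Int) ≤ 0 + (m:Nat) := by omega
    rw [PySem.List.pySetD_of_nonneg _ _ h0, pyGetD_nonneg _ _ _ h0]
    rfl
  have hstepB : ∀ (acc : List Int), ∀ e ∈ l,
      PySem.List.pySetD acc e (PySem.List.pyGetD acc e 0 + 1) = bumpN acc e.toNat 1 := by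
    intro acc e he
    rw [PySem.List.pySetD_of_nonneg _ _ (hl e he).1, pyGetD_nonneg _ _ _ (hl e he).1]
    rfl
  rw [PySem.List.foldl_congr_mem _ _ (fun r (mc : Int × Int) => bumpN r mc.1.toNat mc.2) _ hstepA,
      PySem.List.foldl_congr_mem _ _ (fun r (e : Int) => bumpN r e.toNat 1) _ hstepB]
  apply eq_of_getD
  · rw [length_foldl_bumpN (idx := fun mc : Int × Int => mc.1.toNat) (amt := fun mc : Int × Int => mc.2),
        length_foldl_bumpN (idx := fun e : Int => e.toNat) (amt := fun _ : Int => (1:Int))]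
  intro j
  rw [getD_foldl_bumpN (idx := fun mc : Int × Int => mc.1.toNat) (amt := fun mc : Int × Int => mc.2) _ _ j
        (by intro p hp
            obtain ⟨m, hm, rfl⟩ := (PySem.List.mem_enumerate_iff _ _ _).1 hp
            rw [length_histN] at hm
            simpa [hres] using hm),
      getD_foldl_bumpN (idx := fun e : Int => e.toNat) (amt := fun _ => (1:Int)) _ _ j
        (by intro e he; rw [hres]; exact hKl e he)]
  rw [enum_filter_sum (histN k.toNat l) 0 (fun i => i.toNat == j), length_histN]
  have hsum : ∀ m ∈ Finset.range k.toNat,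
      (if (((0:Int) + (m:Nat)).toNat == j : Bool) then (histN k.toNat l).getD m 0 else 0)
      = (if m = j then ((l.countP (fun r => r.toNat == j)) : Int) else 0) := by
    intro m _
    have hmt : ((0:Int) + (m:Nat)).toNat = m := by omega
    rw [hmt, getD_histN k.toNat l m hKl]
    by_cases h : m = j
    · rw [if_pos (by simp [h]), if_pos h, h]
    · rw [if_neg (by simp [h]), if_neg h]
  rw [Finset.sum_congr rfl hsum,
      Finset.sum_ite_eq' (Finset.range k.toNat) j
        (fun _ => ((l.countP (fun r => r.toNat == j)) : Int))]
  have hones : (((l.filter (fun e => e.toNat == j)).map (fun _ => (1:Int))).sum)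
      = ((l.countP (fun r => r.toNat == j)) : Int) := by
    rw [List.map_const', List.sum_replicate, List.countP_eq_length_filter]
    simp
  rw [hones]
  by_cases h : j ∈ Finset.range k.toNat
  · rw [if_pos h]
  · rw [if_neg h]
    have hz : l.countP (fun r => r.toNat == j) = 0 := by
      rw [List.countP_eq_zero]
      intro r hr
      have := hKl r hr
      have hj : ¬ j < k.toNat := by simpa using h
      simp only [beq_iff_eq]
      omega
    rw [hz]
    simp

-- the single loop step preserves the simulation invariant
theorem step_sim (k : Int) (hk : 0 < k) (res ends : List Int) (v : Int)
    (hres : res.length = k.toNat) (hends : ∀ r ∈ ends, 0 ≤ r ∧ r < k) :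
    stepA k (res, histN k.toNat ends) v
      = (let st := stepMid k (res, ends) v; (st.1, histN k.toNat st.2))
    ∧ (∀ r ∈ (stepMid k (res, ends) v).2, 0 ≤ r ∧ r < k)
    ∧ (stepMid k (res, ends) v).1.length = k.toNat := by
  refine ⟨?_, ?_, ?_⟩
  · show stepA k (res, histN k.toNat ends) v
      = ((stepMid k (res, ends) v).1, histN k.toNat (stepMid k (res, ends) v).2)
    unfold stepA stepMid
    simp only []
    rw [A_ndp_eq k v hk ends hends, res_upd_eq k hk res _ hres
        (by intro r hr
            rcases List.mem_append.1 hr with h | h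
            · obtain ⟨x, _, rfl⟩ := List.mem_map.1 h
              exact ⟨PySem.Int.mod_nonneg _ hk, PySem.Int.mod_lt _ hk⟩
            · rw [List.mem_singleton.1 h]
              exact ⟨PySem.Int.mod_nonneg _ hk, PySem.Int.mod_lt _ hk⟩)]
  · intro r hr
    unfold stepMid at hr
    simp only [] at hr
    rcases List.mem_append.1 hr with h | h
    · obtain ⟨x, _, rfl⟩ := List.mem_map.1 h
      exact ⟨PySem.Int.mod_nonneg _ hk, PySem.Int.mod_lt _ hk⟩
    · rw [List.mem_singleton.1 h]
      exact ⟨PySem.Int.mod_nonneg _ hk, PySem.Int.mod_lt _ hk⟩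
  · show ((stepMid k (res, ends) v).1).length = k.toNat
    unfold stepMid
    simp only []
    rw [length_foldl_pySetD (idx := fun e : Int => e)
        (val := fun r e => PySem.List.pyGetD r e 0 + 1), hres]

theorem sim_loop (k : Int) (hk : 0 < k) (nums : List Int) :
    ∀ (res ends : List Int), res.length = k.toNat → (∀ r ∈ ends, 0 ≤ r ∧ r < k) →
    (nums.foldl (stepA k) (res, histN k.toNat ends)).1
      = (nums.foldl (stepMid k) (res, ends)).1 := by
  induction nums with
  | nil => intro res ends _ _; rfl
  | cons v t ih =>
    intro res ends hres hends
    obtain ⟨h1, h2, h3⟩ := step_sim k hk res ends v hres hends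
    rw [List.foldl_cons, List.foldl_cons, h1]
    exact ih (stepMid k (res, ends) v).1 (stepMid k (res, ends) v).2 h3 h2

-- ===== bridge from the mid formulation to B =====

def tallyL (res l : List Int) : List Int :=
  l.foldl (fun r e => PySem.List.pySetD r e (PySem.List.pyGetD r e 0 + 1)) res

-- the residues of all subarrays, enumerated end-index first (A/mid's order)
def flatEnds (k : Int) : List Int → List Int → List Int
  | _, [] => []
  | ends, v :: rest =>
    let e := ends.map (fun r => PySem.Int.mod (r * v) k) ++ [PySem.Int.mod v k]
    e ++ flatEnds k e rest

-- running-product residues of the subarrays starting at the front element (B's inner loop)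
def scanMod (k : Int) : Int → List Int → List Int
  | _, [] => []
  | p, v :: t => PySem.Int.mod (p * v) k :: scanMod k (PySem.Int.mod (p * v) k) t

-- the residues of all subarrays, enumerated start-index first (B's order)
def rowsR (k : Int) : List Int → List Int
  | [] => []
  | v :: rest => scanMod k 1 (v :: rest) ++ rowsR k rest

theorem mid_fst (k : Int) : ∀ (nums res ends : List Int),
    (nums.foldl (stepMid k) (res, ends)).1 = tallyL res (flatEnds k ends nums) := by
  intro nums
  induction nums with
  | nil => intro res ends; rfl
  | cons v rest ih =>
    intro res ends
    rw [List.foldl_cons]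
    show (rest.foldl (stepMid k) (stepMid k (res, ends) v)).1 = _
    rw [show stepMid k (res, ends) v
        = (tallyL res (ends.map (fun r => PySem.Int.mod (r * v) k) ++ [PySem.Int.mod v k]),
           ends.map (fun r => PySem.Int.mod (r * v) k) ++ [PySem.Int.mod v k]) from rfl,
        ih, flatEnds]
    simp [tallyL, List.foldl_append]

theorem sum_map_ite_one_nat {α : Type} (l : List α) (p : α → Bool) :
    (l.map (fun x => if p x then (1:Nat) else 0)).sum = l.countP p := by
  induction l with
  | nil => rfl
  | cons x t ih =>
    by_cases h : p x <;> simp [List.countP_cons, h, ih] <;> omega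

theorem sum_map_add_nat {α : Type} (l : List α) (f g : α → Nat) :
    (l.map (fun x => f x + g x)).sum = (l.map f).sum + (l.map g).sum := by
  induction l with
  | nil => rfl
  | cons x t ih => simp [ih]; omega

theorem count_flatEnds (k m : Int) : ∀ (nums ends : List Int),
    (flatEnds k ends nums).count m
      = (ends.map (fun r => (scanMod k r nums).count m)).sum + (rowsR k nums).count m := by
  intro nums
  induction nums with
  | nil =>
    intro ends
    simp [flatEnds, rowsR, scanMod]
  | cons v rest ih =>
    intro ends
    rw [flatEnds]
    rw [List.count_append, ih]
    rw [List.map_append, List.sum_append, List.map_map]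
    simp only [List.map_cons, List.map_nil, List.sum_cons, List.sum_nil]
    rw [rowsR]
    simp only [List.count_append]
    rw [show scanMod k 1 (v :: rest)
        = PySem.Int.mod (1 * v) k :: scanMod k (PySem.Int.mod (1 * v) k) rest from rfl,
        one_mul]
    rw [show (ends.map (fun r => (scanMod k r (v :: rest)).count m))
        = ends.map (fun r => (scanMod k (PySem.Int.mod (r * v) k) rest).count m
            + (if PySem.Int.mod (r * v) k == m then 1 else 0)) from by
      apply List.map_congr_left
      intro r _
      rw [show scanMod k r (v :: rest)
          = PySem.Int.mod (r * v) k :: scanMod k (PySem.Int.mod (r * v) k) rest from rfl,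
          List.count_cons]]
    rw [sum_map_add_nat, sum_map_ite_one_nat]
    rw [List.count_cons, List.count_cons, List.count_nil]
    have hcmap : (ends.map (fun r => PySem.Int.mod (r * v) k)).count m
        = ends.countP (fun r => PySem.Int.mod (r * v) k == m) := by
      rw [List.count, List.countP_map]
      rfl
    rw [hcmap]
    have hcomp : (ends.map (fun r => (scanMod k (PySem.Int.mod (r * v) k) rest).count m)).sum
        = (ends.map ((fun r => (scanMod k r rest).count m) ∘ fun r => PySem.Int.mod (r * v) k)).sum := rfl
    rw [hcomp, ← List.map_map]
    omega

theorem mem_flatEnds (k : Int) (hk : 0 < k) : ∀ (nums ends : List Int) (r : Int),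
    r ∈ flatEnds k ends nums → 0 ≤ r ∧ r < k := by
  intro nums
  induction nums with
  | nil => intro ends r hr; simp [flatEnds] at hr
  | cons v rest ih =>
    intro ends r hr
    rw [flatEnds] at hr
    rcases List.mem_append.1 hr with h | h
    · rcases List.mem_append.1 h with h2 | h2
      · obtain ⟨x, _, rfl⟩ := List.mem_map.1 h2
        exact ⟨PySem.Int.mod_nonneg _ hk, PySem.Int.mod_lt _ hk⟩
      · rw [List.mem_singleton.1 h2]
        exact ⟨PySem.Int.mod_nonneg _ hk, PySem.Int.mod_lt _ hk⟩
    · exact ih _ r h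

theorem mem_scanMod (k : Int) (hk : 0 < k) : ∀ (l : List Int) (p r : Int),
    r ∈ scanMod k p l → 0 ≤ r ∧ r < k := by
  intro l
  induction l with
  | nil => intro p r hr; simp [scanMod] at hr
  | cons v t ih =>
    intro p r hr
    rw [scanMod] at hr
    rcases List.mem_cons.1 hr with h | h
    · rw [h]; exact ⟨PySem.Int.mod_nonneg _ hk, PySem.Int.mod_lt _ hk⟩
    · exact ih _ r h

theorem mem_rowsR (k : Int) (hk : 0 < k) : ∀ (nums : List Int) (r : Int),
    r ∈ rowsR k nums → 0 ≤ r ∧ r < k := by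
  intro nums
  induction nums with
  | nil => intro r hr; simp [rowsR] at hr
  | cons v t ih =>
    intro r hr
    rw [rowsR] at hr
    rcases List.mem_append.1 hr with h | h
    · exact mem_scanMod k hk _ _ r h
    · exact ih r h

-- the tally of a residue list into the zero vector is its count table
theorem tallyL_eq_counts (k : Int) (hk : 0 < k) (L : List Int)
    (hL : ∀ r ∈ L, 0 ≤ r ∧ r < k) :
    tallyL (List.replicate k.toNat 0) L
      = (PySem.List.pyRange 0 k 1).map (fun m => ((L.count m : Nat) : Int)) := by
  have hKl : ∀ r ∈ L, r.toNat < k.toNat := by intro r hr; have := hL r hr; omega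
  unfold tallyL
  have hstep : ∀ (acc : List Int), ∀ e ∈ L,
      PySem.List.pySetD acc e (PySem.List.pyGetD acc e 0 + 1) = bumpN acc e.toNat 1 := by
    intro acc e he
    rw [PySem.List.pySetD_of_nonneg _ _ (hL e he).1, pyGetD_nonneg _ _ _ (hL e he).1]
    rfl
  rw [PySem.List.foldl_congr_mem _ _ (fun r (e : Int) => bumpN r e.toNat 1) _ hstep]
  have hlen2 : ((PySem.List.pyRange 0 k 1).map (fun m => ((L.count m : Nat) : Int))).length
      = k.toNat := by
    rw [List.length_map, PySem.List.length_pyRange_one]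
    simp
  apply eq_of_getD
  · rw [length_foldl_bumpN (idx := fun e : Int => e.toNat) (amt := fun _ : Int => (1:Int)),
        List.length_replicate, hlen2]
  intro j
  rw [getD_foldl_bumpN (idx := fun e : Int => e.toNat) (amt := fun _ => (1:Int)) _ _ j
        (by intro e he; rw [List.length_replicate]; exact hKl e he)]
  have hones : (((L.filter (fun e => e.toNat == j)).map (fun _ => (1:Int))).sum)
      = ((L.countP (fun r => r.toNat == j)) : Int) := by
    rw [List.map_const', List.sum_replicate, List.countP_eq_length_filter]
    simp
  have hbase : (List.replicate k.toNat (0:Int)).getD j 0 = 0 := by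
    rw [List.getD_eq_getElem?_getD]
    by_cases h : j < k.toNat
    · simp [List.getElem?_replicate, h]
    · rw [List.getElem?_eq_none (by simpa using h)]
      rfl
  rw [hbase, zero_add, hones]
  by_cases hj : j < k.toNat
  · have hgd : ((PySem.List.pyRange 0 k 1).map (fun m => ((L.count m : Nat) : Int))).getD j 0
        = ((L.count ((j:Nat) : Int) : Nat) : Int) := by
      rw [List.getD_eq_getElem _ _ (by rw [hlen2]; exact hj)]
      rw [List.getElem_map]
      congr 1
      rw [PySem.List.getElem_pyRange_one]
      simp
    rw [hgd]
    congr 1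
    rw [List.count, List.countP]
    apply List.countP_congr
    intro r hr
    have h0 := (hL r hr).1
    constructor
    · intro h; simp only [beq_iff_eq] at *; omega
    · intro h; simp only [beq_iff_eq] at *; omega
  · have hz : L.countP (fun r => r.toNat == j) = 0 := by
      rw [List.countP_eq_zero]
      intro r hr
      have := hKl r hr
      simp only [beq_iff_eq]
      omega
    rw [hz]
    rw [List.getD_eq_getElem?_getD, List.getElem?_eq_none (by rw [hlen2]; omega)]
    rfl

-- B's inner fold appends exactly the scanMod row
theorem innerB (k : Int) : ∀ (l acc : List Int) (p : Int),
    (l.foldl (fun (st : List Int × Int) v =>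
        (st.1 ++ [PySem.Int.mod (st.2 * v) k], PySem.Int.mod (st.2 * v) k)) (acc, p)).1
      = acc ++ scanMod k p l := by
  intro l
  induction l with
  | nil => intro acc p; simp [scanMod]
  | cons v t ih =>
    intro acc p
    rw [List.foldl_cons, scanMod]
    simp only []
    rw [ih]
    simp [List.append_assoc]

-- B's outer fold over the remaining start indices builds rowsR of the remaining suffix
theorem outerB (k : Int) (nums : List Int) : ∀ (rest : List Int) (a : Int) (acc : List Int),
    0 ≤ a → nums.drop a.toNat = rest → a + rest.length = nums.length →
    (PySem.List.pyRange a (nums.length : Int) 1).foldl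
      (fun acc i => acc ++ scanMod k 1 (nums.drop i.toNat)) acc
    = acc ++ rowsR k rest := by
  intro rest
  induction rest with
  | nil =>
    intro a acc ha hdrop hlen
    rw [PySem.List.pyRange_one_eq_nil (by simp at hlen; omega)]
    simp [rowsR]
  | cons v t ih =>
    intro a acc ha hdrop hlen
    have halt : a < (nums.length : Int) := by simp at hlen ⊢; omega
    rw [PySem.List.pyRange_one_cons halt, List.foldl_cons, hdrop]
    have ht1 : (a + 1).toNat = a.toNat + 1 := by omega
    have hdrop2 : nums.drop (a + 1).toNat = t := by
      rw [ht1, ← List.drop_drop, hdrop]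
      simp
    rw [ih (a + 1) (acc ++ scanMod k 1 (v :: t)) (by omega) hdrop2
        (by simp at hlen ⊢; omega)]
    rw [rowsR, List.append_assoc]

theorem resultArray_alt_eq_tally (nums : List Int) (k : Int) :
    resultArray_alt nums k = tallyL (List.replicate k.toNat 0) (rowsR k nums) := by
  unfold resultArray_alt
  simp only []
  unfold tallyL
  congr 1
  have hbody : ∀ (acc : List Int), ∀ i ∈ PySem.List.pyRange 0 (nums.length : Int) 1,
      ((PySem.List.pyRange i (nums.length : Int) 1).foldl
        (fun (st : List Int × Int) j =>
          (st.1 ++ [PySem.Int.mod (st.2 * PySem.List.pyGetD nums j 0) k],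
           PySem.Int.mod (st.2 * PySem.List.pyGetD nums j 0) k))
        (acc, 1)).1
      = acc ++ scanMod k 1 (nums.drop i.toNat) := by
    intro acc i hi
    have hi0 : 0 ≤ i := (PySem.List.mem_pyRange_one.1 hi).1
    rw [PySem.List.foldl_pyRange_pyGetD' nums 0
        (fun (st : List Int × Int) v =>
          (st.1 ++ [PySem.Int.mod (st.2 * v) k], PySem.Int.mod (st.2 * v) k)) (acc, 1) hi0]
    exact innerB k (nums.drop i.toNat) acc 1
  rw [PySem.List.foldl_congr_mem _ _
      (fun acc i => acc ++ scanMod k 1 (nums.drop i.toNat)) _ hbody]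
  exact outerB k nums nums 0 [] (by omega) (by simp) (by simp)

-- ===== VERDICT (by name: the statement is the Claim_ definition above) =====
theorem resultArray_spec : Claim_equal_resultArray := by
  intro nums k _ hpre
  unfold Spec_resultArray resultArray
  rcases hpre with hk | hnil
  · have hk0 : 0 < k := by omega
    have h0 : histN k.toNat ([] : List Int) = List.replicate k.toNat 0 := rfl
    have hs := sim_loop k hk0 nums (List.replicate k.toNat 0) [] (by simp) (by simp)
    rw [h0] at hs
    rw [hs, mid_fst, tallyL_eq_counts k hk0 _ (mem_flatEnds k hk0 nums []),
        resultArray_alt_eq_tally, tallyL_eq_counts k hk0 _ (fun r hr => mem_rowsR k hk0 nums r hr)]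
    apply List.map_congr_left
    intro m _
    rw [count_flatEnds k m nums []]
    simp
  · subst hnil
    show List.replicate k.toNat 0 = resultArray_alt [] k
    rw [resultArray_alt_eq_tally]
    rfl
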